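-- pv_equiv track=rewrite | github.com/maribakulj/Picarones | picarones/importers/iiif.py | _guess_extension
-- ===== SOURCE A (Python) =====
-- def _guess_extension(url: str) -> str:
--     """Détermine l'extension de l'image depuis l'URL."""
--     url_lower = url.lower().split("?")[0]
--     for ext in (".jpg", ".jpeg", ".png", ".tif", ".tiff", ".webp"):
--         if url_lower.endswith(ext):
--             return ext
--     # Par défaut pour les URLs IIIF Image API
--     if "/default." in url_lower or "/native." in url_lower:
--         return ".jpg"
--     return ".jpg"
-- ===== SOURCE B (Python) =====
-- _ALLOWED = frozenset({'.jpg', '.jpeg', '.png', '.tif', '.tiff', '.webp'})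
--
--
-- def _guess_extension(url: str) -> str:
--     """Determine the image extension from the URL (single forward pass)."""
--     path = url.lower().split('?')[0]
--     ext = ''
--     for ch in path:
--         if ch == '.':
--             ext = '.'
--         elif ext:
--             ext += ch
--     return ext if ext in _ALLOWED else '.jpg'
-- ===== Notes on version B (the rewrite author's own statement) =====
-- stated objective: simpler
-- what changed: Replaces the try-each-candidate suffix-matching loop (and the dead IIIF default branch) by a single forward scan that maintains the substring since the most recent dot, followed by one membership test in the allowed-extension set.
import Mathlib
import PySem

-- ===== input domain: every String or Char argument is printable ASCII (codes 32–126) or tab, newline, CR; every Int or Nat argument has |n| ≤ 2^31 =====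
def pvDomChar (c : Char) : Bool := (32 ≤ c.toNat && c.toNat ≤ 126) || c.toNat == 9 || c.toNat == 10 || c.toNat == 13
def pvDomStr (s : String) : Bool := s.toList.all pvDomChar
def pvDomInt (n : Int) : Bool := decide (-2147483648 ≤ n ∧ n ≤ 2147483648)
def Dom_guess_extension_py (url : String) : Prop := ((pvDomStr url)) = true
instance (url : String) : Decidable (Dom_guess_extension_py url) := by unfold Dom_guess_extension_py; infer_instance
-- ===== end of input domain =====

-- B replaces A's try-each-suffix endswith chain (and its dead IIIF default branch)
-- by one forward pass tracking the substring since the last '.', then one membership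
-- test in the allowed-extension set (objective: simpler).


-- ===== PORT A =====
-- A's for-loop over the literal tuple of extensions, with its early return
def pvExtLoop (url_lower : String) : List String → Option String
  | [] => none
  | e :: rest => if PySem.Str.endswith url_lower e then some e else pvExtLoop url_lower rest

def guess_extension_py (url : String) : String :=
  let url_lower := match PySem.Str.split? (PySem.Str.lower url) "?" with
    | some (h :: _) => h
    | _ => ""   -- unreachable: split with a nonempty separator is some nonempty list
  match pvExtLoop url_lower [".jpg", ".jpeg", ".png", ".tif", ".tiff", ".webp"] with
  | some e => e
  | none =>
    if PySem.Str.isIn "/default." url_lower || PySem.Str.isIn "/native." url_lower then ".jpg"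
    else ".jpg"

-- ===== PORT B =====
-- one step of Source B's forward pass: state = chars since the last '.' ([] = none yet)
def pvExtStep (acc : List Char) (c : Char) : List Char :=
  if c = '.' then ['.'] else if acc ≠ [] then acc ++ [c] else []

def pvAllowed : List String := [".jpg", ".jpeg", ".png", ".tif", ".tiff", ".webp"]

def guess_extension_py_alt (url : String) : String :=
  let path := match PySem.Str.split? (PySem.Str.lower url) "?" with
    | some parts => parts.headD ""
    | none => ""
  let ext := String.ofList (path.toList.foldl pvExtStep [])
  if pvAllowed.contains ext then ext else ".jpg"

-- ===== PRECONDITION & SPEC =====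
def Spec_guess_extension_py (url : String) (out : String) : Prop := out = guess_extension_py_alt url
instance (url : String) (out : String) : Decidable (Spec_guess_extension_py url out) := by unfold Spec_guess_extension_py; infer_instance

-- ===== CLAIM (what is proved, stated in full; the proofs are below) =====
def Claim_equal_guess_extension_py : Prop := ∀ (url : String), Dom_guess_extension_py url → Spec_guess_extension_py url (guess_extension_py url)

-- ===== LEMMAS AND PROOFS =====

-- the fold's result on a string ending in '.'::t (t dot-free) is exactly '.'::t
lemma extfold_append_ext (l t : List Char) (ht : '.' ∉ t) :
    (l ++ '.' :: t).foldl pvExtStep [] = '.' :: t := by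
  induction t using List.reverseRecOn with
  | nil => simp [List.foldl_append, pvExtStep]
  | append_singleton t c ih =>
      have hc : c ≠ '.' := by intro h; exact ht (by simp [h])
      have ht' : '.' ∉ t := fun h => ht (by simp [h])
      have he : l ++ '.' :: (t ++ [c]) = (l ++ '.' :: t) ++ [c] := by simp
      rw [he, List.foldl_append, ih ht']
      simp [pvExtStep, hc]

-- a nonempty fold result is a suffix of the input
lemma extfold_suffix (l : List Char) (h : l.foldl pvExtStep [] ≠ []) :
    l.foldl pvExtStep [] <:+ l := by
  induction l using List.reverseRecOn with
  | nil => simp at h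
  | append_singleton t c ih =>
      rw [List.foldl_append] at h ⊢
      by_cases hc : c = '.'
      · refine ⟨t, ?_⟩
        simp [pvExtStep, hc]
      · by_cases hne : t.foldl pvExtStep [] = []
        · exfalso; apply h; simp [List.foldl, pvExtStep, hc, hne]
        · obtain ⟨u, hu⟩ := ih hne
          simp only [List.foldl, pvExtStep, if_neg hc, if_pos (by simpa using hne)]
          exact ⟨u, by rw [← List.append_assoc, hu]⟩

-- A's loop returning some e means e is a listed extension and a suffix of the url
lemma pvExtLoop_some (p : String) (exts : List String) (e : String)
    (h : pvExtLoop p exts = some e) :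
    e ∈ exts ∧ PySem.Chars.endswith p.toList e.toList = true := by
  induction exts with
  | nil => simp [pvExtLoop] at h
  | cons a rest ih =>
      rw [pvExtLoop, PySem.Str.endswith_eq] at h
      by_cases ha : PySem.Chars.endswith p.toList a.toList = true
      · rw [if_pos ha] at h
        cases h
        exact ⟨List.mem_cons_self, ha⟩
      · rw [if_neg ha] at h
        obtain ⟨h1, h2⟩ := ih h
        exact ⟨List.mem_cons_of_mem _ h1, h2⟩

-- A's loop returning none means no listed extension is a suffix of the url
lemma pvExtLoop_none (p : String) (exts : List String)
    (h : pvExtLoop p exts = none) :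
    ∀ e ∈ exts, PySem.Chars.endswith p.toList e.toList = false := by
  induction exts with
  | nil => simp
  | cons a rest ih =>
      rw [pvExtLoop, PySem.Str.endswith_eq] at h
      by_cases ha : PySem.Chars.endswith p.toList a.toList = true
      · rw [if_pos ha] at h; cases h
      · rw [if_neg ha] at h
        intro e he
        rcases List.mem_cons.mp he with rfl | he'
        · simpa using ha
        · exact ih h e he'

-- core: on any query-stripped lowercased path p, A's body equals B's body
lemma body_eq (p : String) :
    (match pvExtLoop p pvAllowed with
      | some e => e
      | none =>
        if PySem.Str.isIn "/default." p || PySem.Str.isIn "/native." p then ".jpg"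
        else ".jpg") =
    (if pvAllowed.contains (String.ofList (p.toList.foldl pvExtStep [])) then
        String.ofList (p.toList.foldl pvExtStep []) else ".jpg") := by
  cases hl : pvExtLoop p pvAllowed with
  | some e =>
      obtain ⟨hmem, hend⟩ := pvExtLoop_some p pvAllowed e hl
      obtain ⟨pre, hpre⟩ := (PySem.Chars.endswith_iff _ _).mp hend
      have hF : p.toList.foldl pvExtStep [] = e.toList := by
        fin_cases hmem <;>
          · rw [← hpre]
            exact extfold_append_ext pre _ (by decide)
      rw [hF]
      show e = if pvAllowed.contains (String.ofList e.toList) = true then String.ofList e.toList else ".jpg"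
      fin_cases hmem <;> decide
  | none =>
      have hnone := pvExtLoop_none p pvAllowed hl
      by_cases hc : pvAllowed.contains (String.ofList (p.toList.foldl pvExtStep [])) = true
      · exfalso
        have hne : p.toList.foldl pvExtStep [] ≠ [] := by
          intro h0
          rw [h0] at hc
          simp [pvAllowed] at hc
        have hsuf := extfold_suffix _ hne
        have hmem : (String.ofList (p.toList.foldl pvExtStep [])) ∈ pvAllowed := by
          simpa using hc
        have hbad : PySem.Chars.endswith p.toList (String.ofList (p.toList.foldl pvExtStep [])).toList = true := by
          rw [PySem.Chars.endswith_iff, String.toList_ofList]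
          exact hsuf
        rw [hnone _ hmem] at hbad
        exact Bool.false_ne_true hbad
      · rw [if_neg hc]
        split
        · next e heq => exact absurd heq (by simp)
        · split <;> rfl

-- ===== VERDICT (by name: the statement is the Claim_ definition above) =====
theorem guess_extension_py_spec : Claim_equal_guess_extension_py := by
  intro url _
  unfold Spec_guess_extension_py guess_extension_py guess_extension_py_alt
  simp only []
  have hX : (match PySem.Str.split? (PySem.Str.lower url) "?" with
      | some (h :: _) => h
      | _ => "") = (match PySem.Str.split? (PySem.Str.lower url) "?" with
      | some parts => parts.headD ""
      | none => "") := by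
    cases h : PySem.Str.split? (PySem.Str.lower url) "?" with
    | none => rfl
    | some l => cases l <;> rfl
  rw [hX]
  generalize (match PySem.Str.split? (PySem.Str.lower url) "?" with
    | some parts => parts.headD ""
    | none => "") = p
  exact body_eq p
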